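-- pv_equiv track=rewrite | github.com/haoyu234/columns | columns.py | check_is_len
-- ===== SOURCE A (Python) =====
-- def check_is_len(prev_name: str, name: str) -> bool:
--     prefixs = ["num"]
--     suffixs = ["num", "size", "count", "len"]
--
--     prev_name_lower = prev_name.lower()
--
--     all_keywords = set(prefixs).union(suffixs)
--     if prev_name_lower in all_keywords:
--         return True
--
--     for s in prefixs:
--         s2 = f"{name}{s}".lower()
--         s3 = f"{name}_{s}".lower()
--
--         if prev_name_lower == s2 or prev_name_lower == s3:
--             return True
--
--     for s in suffixs:
--         s2 = f"{s}{name}".lower()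
--         s3 = f"{s}_{name}".lower()
--
--         if prev_name_lower == s2 or prev_name_lower == s3:
--             return True
--
--     return False
-- ===== SOURCE B (Python) =====
-- def check_is_len(prev_name: str, name: str) -> bool:
--     p = prev_name.lower()
--     n = name.lower()
--     if p in ("num", "size", "count", "len"):
--         return True
--     if p.startswith(n) and p[len(n):] in ("num", "_num"):
--         return True
--     if p.endswith(n) and p[:len(p) - len(n)] in (
--         "num", "num_", "size", "size_", "count", "count_", "len", "len_"
--     ):
--         return True
--     return False
-- ===== Notes on version B (the rewrite author's own statement) =====
-- stated objective: simpler
-- what changed: Instead of building every candidate string name+suffix / prefix+name and equality-testing each, B lowercases once and deconstructs prev_name: one startswith check with the remainder tested against {num,_num} and one endswith check with the leading part tested against the eight prefix variants.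
import Mathlib
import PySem

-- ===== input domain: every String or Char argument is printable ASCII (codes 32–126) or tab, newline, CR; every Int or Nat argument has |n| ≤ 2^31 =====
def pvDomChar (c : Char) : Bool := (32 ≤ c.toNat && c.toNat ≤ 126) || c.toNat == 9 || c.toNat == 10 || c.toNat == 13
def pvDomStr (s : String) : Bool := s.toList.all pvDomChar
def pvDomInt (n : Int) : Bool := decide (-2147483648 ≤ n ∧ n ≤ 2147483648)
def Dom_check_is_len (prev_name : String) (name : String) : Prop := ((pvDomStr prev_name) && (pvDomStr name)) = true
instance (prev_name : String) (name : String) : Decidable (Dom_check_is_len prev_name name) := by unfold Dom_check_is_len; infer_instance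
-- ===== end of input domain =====

-- B replaces A's enumeration of concatenated candidate strings by one startswith/endswith
-- deconstruction of the lowered prev_name (objective: simpler).

-- ===== PORT A =====
-- prefixs / suffixs and all_keywords = set(prefixs).union(suffixs); string literals as char lists
def pvPrefixsA : List (List Char) := [['n','u','m']]
def pvSuffixsA : List (List Char) := [['n','u','m'], ['s','i','z','e'], ['c','o','u','n','t'], ['l','e','n']]
def pvKeywordsA : List (List Char) := PySem.Set.ofList (pvPrefixsA ++ pvSuffixsA)

-- literal transliteration of A on the char-list level (each String parameter enters via .toList)
def check_is_len_chars (p : List Char) (n : List Char) : Bool :=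
  let pl := PySem.Chars.lower p
  if pvKeywordsA.contains pl then true
  else if pvPrefixsA.any (fun s =>
      pl == PySem.Chars.lower (n ++ s) || pl == PySem.Chars.lower (n ++ '_' :: s)) then true
  else if pvSuffixsA.any (fun s =>
      pl == PySem.Chars.lower (s ++ n) || pl == PySem.Chars.lower (s ++ '_' :: n)) then true
  else false

def check_is_len (prev_name : String) (name : String) : Bool :=
  check_is_len_chars prev_name.toList name.toList

-- ===== PORT B =====
def check_is_len_alt_chars (p : List Char) (n : List Char) : Bool :=
  let pl := PySem.Chars.lower p
  let nl := PySem.Chars.lower n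
  if pl == ['n','u','m'] || pl == ['s','i','z','e'] || pl == ['c','o','u','n','t'] || pl == ['l','e','n'] then
    true
  else if PySem.Chars.startswith pl nl &&
      (pl.drop nl.length == ['n','u','m'] || pl.drop nl.length == ['_','n','u','m']) then true
  else if PySem.Chars.endswith pl nl &&
      (pl.take (pl.length - nl.length) == ['n','u','m'] ||
       pl.take (pl.length - nl.length) == ['n','u','m','_'] ||
       pl.take (pl.length - nl.length) == ['s','i','z','e'] ||
       pl.take (pl.length - nl.length) == ['s','i','z','e','_'] ||
       pl.take (pl.length - nl.length) == ['c','o','u','n','t'] ||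
       pl.take (pl.length - nl.length) == ['c','o','u','n','t','_'] ||
       pl.take (pl.length - nl.length) == ['l','e','n'] ||
       pl.take (pl.length - nl.length) == ['l','e','n','_']) then true
  else false

def check_is_len_alt (prev_name : String) (name : String) : Bool :=
  check_is_len_alt_chars prev_name.toList name.toList

-- ===== PRECONDITION & SPEC =====
def Spec_check_is_len (prev_name : String) (name : String) (out : Bool) : Prop := out = check_is_len_alt prev_name name
instance (prev_name : String) (name : String) (out : Bool) : Decidable (Spec_check_is_len prev_name name out) := by unfold Spec_check_is_len; infer_instance

-- ===== CLAIM (what is proved, stated in full; the proofs are below) =====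
def Claim_equal_check_is_len : Prop := ∀ (prev_name : String) (name : String), Dom_check_is_len prev_name name → Spec_check_is_len prev_name name (check_is_len prev_name name)

-- ===== LEMMAS AND PROOFS =====

-- "pl starts with nl and the rest is r" is exactly "pl = nl ++ r"
theorem pv_start_decomp (pl nl r : List Char) :
    (PySem.Chars.startswith pl nl && (pl.drop nl.length == r)) = (pl == nl ++ r) := by
  rcases h : PySem.Chars.startswith pl nl with _ | _
  · have hp : ¬ nl <+: pl := fun hx => by
      rw [(PySem.Chars.startswith_iff pl nl).mpr hx] at h; cases h
    simp only [Bool.false_and]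
    symm
    simp only [beq_eq_false_iff_ne, ne_eq]
    intro he; exact hp (he ▸ List.prefix_append nl r)
  · obtain ⟨t, ht⟩ := (PySem.Chars.startswith_iff pl nl).mp h
    subst ht
    simp

-- "pl ends with nl and the part before it is q" is exactly "pl = q ++ nl"
theorem pv_end_decomp (pl nl q : List Char) :
    (PySem.Chars.endswith pl nl && (pl.take (pl.length - nl.length) == q)) = (pl == q ++ nl) := by
  rcases h : PySem.Chars.endswith pl nl with _ | _
  · have hp : ¬ nl <:+ pl := fun hx => by
      rw [(PySem.Chars.endswith_iff pl nl).mpr hx] at h; cases h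
    simp only [Bool.false_and]
    symm
    simp only [beq_eq_false_iff_ne, ne_eq]
    intro he; exact hp (he ▸ List.suffix_append q nl)
  · obtain ⟨t, ht⟩ := (PySem.Chars.endswith_iff pl nl).mp h
    subst ht
    simp

theorem pv_chars_eq (p n : List Char) :
    check_is_len_chars p n = check_is_len_alt_chars p n := by
  simp only [check_is_len_chars, check_is_len_alt_chars, pvPrefixsA, pvSuffixsA, pvKeywordsA,
    List.any_cons, List.any_nil, Bool.or_false, Bool.and_or_distrib_left]
  rw [pv_start_decomp (PySem.Chars.lower p) (PySem.Chars.lower n) ['n','u','m'],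
      pv_start_decomp (PySem.Chars.lower p) (PySem.Chars.lower n) ['_','n','u','m'],
      pv_end_decomp (PySem.Chars.lower p) (PySem.Chars.lower n) ['n','u','m'],
      pv_end_decomp (PySem.Chars.lower p) (PySem.Chars.lower n) ['n','u','m','_'],
      pv_end_decomp (PySem.Chars.lower p) (PySem.Chars.lower n) ['s','i','z','e'],
      pv_end_decomp (PySem.Chars.lower p) (PySem.Chars.lower n) ['s','i','z','e','_'],
      pv_end_decomp (PySem.Chars.lower p) (PySem.Chars.lower n) ['c','o','u','n','t'],
      pv_end_decomp (PySem.Chars.lower p) (PySem.Chars.lower n) ['c','o','u','n','t','_'],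
      pv_end_decomp (PySem.Chars.lower p) (PySem.Chars.lower n) ['l','e','n'],
      pv_end_decomp (PySem.Chars.lower p) (PySem.Chars.lower n) ['l','e','n','_'],
      show PySem.Set.ofList ([['n','u','m']] ++ [['n','u','m'], ['s','i','z','e'],
        ['c','o','u','n','t'], ['l','e','n']]) =
        [['n','u','m'], ['s','i','z','e'], ['c','o','u','n','t'], ['l','e','n']] from by decide]
  simp only [
    show ∀ a : List Char, PySem.Chars.lower a = List.map PySem.Chars.lowerChar a from
      fun _ => rfl]
  simp only [List.map_append, List.map_cons, List.map_nil, List.cons_append, List.nil_append,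
    List.contains_cons, List.contains_nil, Bool.or_false,
    show PySem.Chars.lowerChar 'n' = 'n' from by decide,
    show PySem.Chars.lowerChar 'u' = 'u' from by decide,
    show PySem.Chars.lowerChar 'm' = 'm' from by decide,
    show PySem.Chars.lowerChar 's' = 's' from by decide,
    show PySem.Chars.lowerChar 'i' = 'i' from by decide,
    show PySem.Chars.lowerChar 'z' = 'z' from by decide,
    show PySem.Chars.lowerChar 'e' = 'e' from by decide,
    show PySem.Chars.lowerChar 'c' = 'c' from by decide,
    show PySem.Chars.lowerChar 'o' = 'o' from by decide,
    show PySem.Chars.lowerChar 't' = 't' from by decide,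
    show PySem.Chars.lowerChar 'l' = 'l' from by decide,
    show PySem.Chars.lowerChar '_' = '_' from by decide]
  simp only [Bool.if_true_left, Bool.if_false_right, Bool.and_true, Bool.decide_eq_true, Bool.or_assoc]

-- ===== VERDICT (by name: the statement is the Claim_ definition above) =====
theorem check_is_len_spec : Claim_equal_check_is_len := by
  intro prev_name name _
  unfold Spec_check_is_len check_is_len check_is_len_alt
  exact pv_chars_eq prev_name.toList name.toList
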